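-- pv_equiv track=rewrite | github.com/Trebolium/myWorld | myWorld/utils.py | substring_exclusion
-- ===== SOURCE A (Python) =====
-- def substring_exclusion(main_list, exclude_list):
--     filtered_list = []
--     for f_path in main_list:
--         exclusion_found = False
--         for exclusion in exclude_list:
--             if exclusion in f_path:
--                 exclusion_found = True
--         if exclusion_found == False:
--             filtered_list.append(f_path)
--     return filtered_list
-- ===== SOURCE B (Python) =====
-- def substring_exclusion(main_list, exclude_list):
--     # Invert the loop nesting: each exclusion pattern prunes the survivor
--     # list once, so already-excluded paths are never scanned again.
--     survivors = list(main_list)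
--     for exclusion in exclude_list:
--         survivors = [p for p in survivors if exclusion not in p]
--     return survivors
-- ===== Notes on version B (the rewrite author's own statement) =====
-- stated objective: faster
-- what changed: Inverted the loop nesting: instead of testing every exclusion against each path (A has no break, so it always scans all patterns), B folds over exclude_list, filtering the survivor list once per pattern so already-excluded paths are never rescanned.
import Mathlib
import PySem

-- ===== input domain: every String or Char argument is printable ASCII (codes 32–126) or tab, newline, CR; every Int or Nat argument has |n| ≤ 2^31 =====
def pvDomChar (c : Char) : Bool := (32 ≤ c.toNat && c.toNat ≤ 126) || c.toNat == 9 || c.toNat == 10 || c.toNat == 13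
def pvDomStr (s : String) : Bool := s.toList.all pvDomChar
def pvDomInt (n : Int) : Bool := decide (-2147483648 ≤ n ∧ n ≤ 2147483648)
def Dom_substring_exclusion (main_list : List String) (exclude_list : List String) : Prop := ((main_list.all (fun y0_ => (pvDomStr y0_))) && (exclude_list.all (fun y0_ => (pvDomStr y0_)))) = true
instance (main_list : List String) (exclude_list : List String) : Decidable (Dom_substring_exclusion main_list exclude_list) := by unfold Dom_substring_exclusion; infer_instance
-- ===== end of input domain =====

-- B inverts the loop nesting: it folds over exclude_list, pruning the survivor list once per pattern (alternative traversal, same result).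
-- ===== PORT A =====
def substring_exclusion (main_list : List String) (exclude_list : List String) : List String :=
  main_list.foldl
    (fun filtered_list f_path =>
      let exclusion_found :=
        exclude_list.foldl
          (fun exclusion_found exclusion =>
            if PySem.Str.isIn exclusion f_path then true else exclusion_found)
          false
      if exclusion_found = false then filtered_list ++ [f_path] else filtered_list)
    []

-- ===== PORT B =====
def substring_exclusion_alt (main_list : List String) (exclude_list : List String) : List String :=
  exclude_list.foldl
    (fun survivors exclusion => survivors.filter (fun p => !(PySem.Str.isIn exclusion p)))
    main_list

-- ===== PRECONDITION & SPEC =====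
def Spec_substring_exclusion (main_list : List String) (exclude_list : List String) (out : List String) : Prop := out = substring_exclusion_alt main_list exclude_list
instance (main_list : List String) (exclude_list : List String) (out : List String) : Decidable (Spec_substring_exclusion main_list exclude_list out) := by unfold Spec_substring_exclusion; infer_instance

-- ===== CLAIM (what is proved, stated in full; the proofs are below) =====
def Claim_equal_substring_exclusion : Prop := ∀ (main_list : List String) (exclude_list : List String), Dom_substring_exclusion main_list exclude_list → Spec_substring_exclusion main_list exclude_list (substring_exclusion main_list exclude_list)

-- ===== LEMMAS AND PROOFS =====

-- ===== VERDICT (by name: the statement is the Claim_ definition above) =====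
-- inner loop of A: leftover-state boolean OR over all exclusions
theorem pvInner (f_path : String) (es : List String) (b : Bool) :
    es.foldl (fun acc e => if PySem.Str.isIn e f_path then true else acc) b
      = (b || es.any (fun e => PySem.Str.isIn e f_path)) := by
  induction es generalizing b with
  | nil => simp
  | cons e es ih =>
    simp only [List.foldl_cons, List.any_cons]
    rw [ih]
    cases h : PySem.Str.isIn e f_path <;> simp [h]

-- outer loop of A is an append-only fold = filter
theorem pvOuter (cond : String → Bool) (l acc : List String) :
    l.foldl (fun filtered p => if cond p = false then filtered ++ [p] else filtered) acc
      = acc ++ l.filter (fun p => !cond p) := by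
  induction l generalizing acc with
  | nil => simp
  | cons p l ih =>
    simp only [List.foldl_cons, List.filter_cons]
    cases h : cond p <;> simp [h, ih]

theorem pvA_filter (main_list exclude_list : List String) :
    substring_exclusion main_list exclude_list
      = main_list.filter (fun p => !exclude_list.any (fun e => PySem.Str.isIn e p)) := by
  unfold substring_exclusion
  have : ∀ p : String,
      (exclude_list.foldl (fun acc e => if PySem.Str.isIn e p then true else acc) false)
        = exclude_list.any (fun e => PySem.Str.isIn e p) := by
    intro p; rw [pvInner]; simp
  calc main_list.foldl
        (fun filtered_list f_path =>
          let exclusion_found :=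
            exclude_list.foldl
              (fun exclusion_found exclusion =>
                if PySem.Str.isIn exclusion f_path then true else exclusion_found) false
          if exclusion_found = false then filtered_list ++ [f_path] else filtered_list) []
      = main_list.foldl
        (fun filtered_list f_path =>
          if (exclude_list.any (fun e => PySem.Str.isIn e f_path)) = false
          then filtered_list ++ [f_path] else filtered_list) [] := by
        simp only [this]
    _ = _ := by
        rw [pvOuter (fun p => exclude_list.any (fun e => PySem.Str.isIn e p)) main_list []]
        simp

theorem pvB_filter (main_list exclude_list : List String) :
    substring_exclusion_alt main_list exclude_list
      = main_list.filter (fun p => !exclude_list.any (fun e => PySem.Str.isIn e p)) := by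
  unfold substring_exclusion_alt
  induction exclude_list generalizing main_list with
  | nil => simp
  | cons e es ih =>
    simp only [List.foldl_cons]
    rw [ih, List.filter_filter]
    congr 1
    funext p
    simp [Bool.and_comm]

theorem substring_exclusion_spec : Claim_equal_substring_exclusion := by
  intro main_list exclude_list _
  unfold Spec_substring_exclusion
  rw [pvA_filter, pvB_filter]
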